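-- pv_equiv track=rewrite | github.com/glipR/MuMonash | CFRound592/B/B.py | solve
-- ===== SOURCE A (Python) =====
-- def solve(string):
--     # We should always start at left or right end.
--     nums = []
--     for x in range(len(string)):
--         if string[x] == '1':
--             nums.append(x)
--     if nums == []:
--         return len(string)
--     dist1 = 2 * (len(string) - nums[0])
--     dist2 = 2 * (nums[-1] + 1)
--     return max(dist1, dist2)
-- ===== SOURCE B (Python) =====
-- def solve(string):
--     # Answer = max over every '1' at position x of 2*max(n - x, x + 1)
--     # (the farther of its two "clear from an end" distances), or n if no '1'.
--     # A single running-max pass; no index list, no first/last extraction.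
--     n = len(string)
--     best = n
--     for x, c in enumerate(string):
--         if c == '1':
--             best = max(best, 2 * max(n - x, x + 1))
--     return best
-- ===== Notes on version B (the rewrite author's own statement) =====
-- stated objective: alternative
-- what changed: Instead of collecting all '1' indices into a list and reading off its first and last element, B folds a single running maximum of the per-position candidate distance 2*max(n-x, x+1) over every '1', seeded with n; no list is kept and no endpoints are extracted.
import Mathlib
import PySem

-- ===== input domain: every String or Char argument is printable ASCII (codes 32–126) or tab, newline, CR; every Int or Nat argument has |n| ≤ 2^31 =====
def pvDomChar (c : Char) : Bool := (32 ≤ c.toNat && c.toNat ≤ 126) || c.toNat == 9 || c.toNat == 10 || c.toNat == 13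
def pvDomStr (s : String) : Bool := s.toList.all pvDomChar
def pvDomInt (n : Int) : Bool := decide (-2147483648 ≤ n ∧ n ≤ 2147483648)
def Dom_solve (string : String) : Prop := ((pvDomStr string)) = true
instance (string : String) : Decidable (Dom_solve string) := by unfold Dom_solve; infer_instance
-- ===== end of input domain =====

-- B replaces A's index-list-then-endpoints scheme by a single running-max fold of the
-- per-position distance 2*max(n-x, x+1) over the '1's, seeded with n; objective: alternative.


-- ===== PORT A =====
-- nums[-1] on the (nonempty) list is Python's negative index −1, i.e. the last element.
def solve (string : String) : Int :=
  let nums : List Int :=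
    (PySem.List.pyRange 0 (PySem.Str.len string) 1).foldl
      (fun acc x => if PySem.Str.pyGet? string x = some '1' then acc ++ [x] else acc) []
  match nums with
  | [] => PySem.Str.len string
  | n0 :: rest =>
    let dist1 := 2 * (PySem.Str.len string - n0)
    let dist2 := 2 * ((n0 :: rest).getLast (by simp) + 1)
    max dist1 dist2

-- ===== PORT B =====
def solve_alt (string : String) : Int :=
  let n := PySem.Str.len string
  (PySem.List.enumerate string.toList 0).foldl
    (fun best xc => if xc.2 = '1' then max best (2 * max (n - xc.1) (xc.1 + 1)) else best) n

-- ===== PRECONDITION & SPEC =====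
def Spec_solve (string : String) (out : Int) : Prop := out = solve_alt string
instance (string : String) (out : Int) : Decidable (Spec_solve string out) := by unfold Spec_solve; infer_instance

-- ===== CLAIM (what is proved, stated in full; the proofs are below) =====
def Claim_equal_solve : Prop := ∀ (string : String), Dom_solve string → Spec_solve string (solve string)

-- ===== LEMMAS AND PROOFS =====

-- the list of positions of '1' in l, as Nats
def onesIdx (l : List Char) : List Nat :=
  (List.range l.length).filter (fun k => decide (l[k]? = some '1'))

theorem onesIdx_cons (c : Char) (t : List Char) :
    onesIdx (c :: t) = (if c = '1' then [0] else []) ++ (onesIdx t).map (· + 1) := by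
  unfold onesIdx
  rw [List.length_cons, List.range_succ_eq_map, List.filter_cons, List.filter_map,
    show (Nat.succ : Nat → Nat) = fun x => x + 1 from rfl]
  by_cases hc : c = '1' <;> simp [hc, Function.comp_def] <;> rfl

theorem onesIdx_pairwise (l : List Char) : (onesIdx l).Pairwise (· < ·) :=
  List.Pairwise.sublist (List.filter_sublist) (List.pairwise_lt_range)

-- B's fold over enumerate, rewritten to a max-fold over the mapped '1' positions
theorem foldB (l : List Char) (n : Int) :
    ∀ (s init : Int),
    (PySem.List.enumerate l s).foldl
      (fun best xc => if xc.2 = '1' then max best (2 * max (n - xc.1) (xc.1 + 1)) else best) init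
    = ((onesIdx l).map (fun k : Nat => 2 * max (n - (s + k)) ((s + k) + 1))).foldl max init := by
  induction l with
  | nil => intro s init; simp [PySem.List.enumerate_nil, onesIdx]
  | cons c t ih =>
    intro s init
    rw [PySem.List.enumerate_cons, List.foldl_cons, onesIdx_cons]
    dsimp only
    have hmap : List.map ((fun k : Nat => 2 * max (n - (s + k)) ((s + k) + 1)) ∘ (· + 1)) (onesIdx t)
        = List.map (fun k : Nat => 2 * max (n - ((s + 1) + k)) (((s + 1) + k) + 1)) (onesIdx t) := by
      apply List.map_congr_left
      intro k _
      simp only [Function.comp_apply]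
      have h1 : s + ((k : Int) + 1) = (s + 1) + (k : Int) := by ring
      push_cast
      rw [h1]
    by_cases hc : c = '1'
    · rw [if_pos hc, if_pos hc, List.map_append, List.map_map, hmap, List.map_cons,
        List.map_nil, List.singleton_append, List.foldl_cons, ih]
      norm_num
    · rw [if_neg hc, if_neg hc, List.nil_append, List.map_map, hmap, ih]

-- max-fold bounds
theorem foldl_max_le (L : List Int) : ∀ (init M : Int), init ≤ M → (∀ c ∈ L, c ≤ M) →
    L.foldl max init ≤ M := by
  induction L with
  | nil => intro init M h _; simpa using h
  | cons a t ih =>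
    intro init M h hall
    rw [List.foldl_cons]
    exact ih _ M (max_le h (hall a (by simp))) (fun c hc => hall c (by simp [hc]))

theorem le_foldl_max_init (L : List Int) : ∀ (init : Int), init ≤ L.foldl max init := by
  induction L with
  | nil => intro init; simp
  | cons a t ih =>
    intro init
    rw [List.foldl_cons]
    exact le_trans (le_max_left _ _) (ih _)

theorem mem_le_foldl_max (L : List Int) : ∀ (init c : Int), c ∈ L → c ≤ L.foldl max init := by
  induction L with
  | nil => intro _ c hc; simp at hc
  | cons a t ih =>
    intro init c hc
    rw [List.foldl_cons]
    rcases List.mem_cons.mp hc with rfl | hct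
    · exact le_trans (le_max_right _ _) (le_foldl_max_init t _)
    · exact ih _ c hct

-- pairwise (<) list: head is the minimum, getLast the maximum
theorem pairwise_head_min (a : Nat) (rest : List Nat)
    (hp : (a :: rest).Pairwise (· < ·)) : ∀ k ∈ a :: rest, a ≤ k := by
  intro k hk
  rcases List.mem_cons.mp hk with rfl | hkt
  · exact le_refl _
  · exact le_of_lt ((List.pairwise_cons.mp hp).1 k hkt)

theorem pairwise_le_getLast (L : List Nat) (hL : L ≠ [])
    (hp : L.Pairwise (· < ·)) : ∀ k ∈ L, k ≤ L.getLast hL := by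
  induction L with
  | nil => exact absurd rfl hL
  | cons a t ih =>
    intro k hk
    rcases eq_or_ne t [] with rfl | htne
    · simp at hk
      simp [hk, List.getLast_singleton]
    · rw [List.getLast_cons htne]
      rcases List.mem_cons.mp hk with rfl | hkt
      · exact le_of_lt ((List.pairwise_cons.mp hp).1 _ (List.getLast_mem htne))
      · exact ih htne (List.pairwise_cons.mp hp).2 k hkt

theorem solve_eq_alt (string : String) : solve string = solve_alt string := by
  have hnums : (PySem.List.pyRange 0 ((string.toList.length : Nat) : Int) 1).foldl
      (fun acc x => if PySem.Str.pyGet? string x = some '1' then acc ++ [x] else acc) ([] : List Int)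
      = (onesIdx string.toList).map (fun k : Nat => (k : Int)) := by
    rw [PySem.List.foldl_append_ite_eq_filter,
      PySem.List.pyRange_zero_natCast, List.filter_map]
    simp [onesIdx, Function.comp_def]
  set n : Int := (string.toList.length : Int) with hn
  have hB : solve_alt string
      = ((onesIdx string.toList).map
          (fun k : Nat => 2 * max (n - (k : Int)) ((k : Int) + 1))).foldl max n := by
    simp only [solve_alt, PySem.Str.len_eq, ← hn]
    rw [foldB string.toList n 0 n]
    congr 1
    apply List.map_congr_left
    intro k _
    norm_num
  cases honj : onesIdx string.toList with
  | nil =>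
    simp only [solve, PySem.Str.len_eq, hnums, honj, List.map_nil, hB, List.foldl_nil, ← hn]
  | cons a rest =>
    obtain ⟨b, hbeq⟩ : ∃ b, (a :: rest).getLast (by simp) = b := ⟨_, rfl⟩
    have hp : (a :: rest).Pairwise (· < ·) := by rw [← honj]; exact onesIdx_pairwise _
    have hmin : ∀ k ∈ a :: rest, a ≤ k := pairwise_head_min a rest hp
    have hmax : ∀ k ∈ a :: rest, k ≤ b := by
      intro k hk
      rw [← hbeq]
      exact pairwise_le_getLast (a :: rest) (by simp) hp k hk
    have hbmem : b ∈ a :: rest := by rw [← hbeq]; exact List.getLast_mem (by simp)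
    set M : Int := max (2 * (n - (a : Int))) (2 * ((b : Int) + 1)) with hM
    have hA : solve string = M := by
      simp only [solve, PySem.Str.len_eq, hnums, honj, List.map_cons, ← hn]
      have hgl : ((a : Int) :: List.map (fun k : Nat => (k : Int)) rest).getLast (by simp)
          = (b : Int) := by
        have h := List.getLast_map (f := fun k : Nat => (k : Int)) (l := a :: rest) (by simp)
        simpa [hbeq] using h
      simp only [hgl, hM]
    rw [hA, hB, honj]
    set g : Nat → Int := fun k => 2 * max (n - (k : Int)) ((k : Int) + 1) with hg
    have hle : ((a :: rest).map g).foldl max n ≤ M := by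
      apply foldl_max_le
      · have hab : a ≤ b := hmax a (by simp)
        have hab' : (a : Int) ≤ (b : Int) := by exact_mod_cast hab
        simp only [hM]
        rcases le_total (n - (a : Int)) ((a : Int) + 1) with h | h <;> omega
      · intro c hc
        obtain ⟨k, hk, rfl⟩ := List.mem_map.mp hc
        have h1 : (a : Int) ≤ (k : Int) := by exact_mod_cast hmin k hk
        have h2 : (k : Int) ≤ (b : Int) := by exact_mod_cast hmax k hk
        simp only [hg, hM]
        rcases le_total (n - (k : Int)) ((k : Int) + 1) with h | h <;> omega
    have hge : M ≤ ((a :: rest).map g).foldl max n := by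
      have hga : g a ≤ ((a :: rest).map g).foldl max n :=
        mem_le_foldl_max _ _ _ (List.mem_map.mpr ⟨a, by simp, rfl⟩)
      have hgb : g b ≤ ((a :: rest).map g).foldl max n :=
        mem_le_foldl_max _ _ _ (List.mem_map.mpr ⟨b, hbmem, rfl⟩)
      have h1 : 2 * (n - (a : Int)) ≤ g a := by
        simp only [hg]; rcases le_total (n - (a : Int)) ((a : Int) + 1) with h | h <;> omega
      have h2 : 2 * ((b : Int) + 1) ≤ g b := by
        simp only [hg]; rcases le_total (n - (b : Int)) ((b : Int) + 1) with h | h <;> omega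
      simp only [hM]
      omega
    omega

-- ===== VERDICT (by name: the statement is the Claim_ definition above) =====
theorem solve_spec : Claim_equal_solve := by
  intro string _
  unfold Spec_solve
  exact solve_eq_alt string
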